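-- pv_equiv track=rewrite | github.com/ViderStar/control_and_diagnostics_of_computing_systems | helpers/lfsr.py | _build_taps_mask
-- ===== SOURCE A (Python) =====
-- from typing import Iterable, List
--
-- def _build_taps_mask(degrees: Iterable[int]) -> int:
--     mask = 0
--     highest = max(degrees)
--     for degree in degrees:
--         if degree in (highest, 0):
--             continue
--         mask |= 1 << (degree - 1)
--     return mask
-- ===== SOURCE B (Python) =====
-- def _build_taps_mask(degrees):
--     # Sort the distinct degrees ascending: the highest degree is then the LAST
--     # element, so it is excluded positionally (slice [:-1]) instead of being
--     # compared against inside the loop; the remaining distinct positions give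
--     # distinct powers of two, whose arithmetic sum equals the OR-ed mask.
--     ordered = sorted(set(degrees))
--     return sum(1 << (d - 1) for d in ordered[:-1] if d != 0)
-- ===== Notes on version B (the rewrite author's own statement) =====
-- stated objective: alternative
-- what changed: B replaces A's max()-then-filtering OR loop by sort-then-slice: it sorts the distinct degrees ascending, drops the last element positionally (the highest, no comparison against max inside the loop) and returns the arithmetic sum of 2**(d-1) over the remaining nonzero degrees.
import Mathlib
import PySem

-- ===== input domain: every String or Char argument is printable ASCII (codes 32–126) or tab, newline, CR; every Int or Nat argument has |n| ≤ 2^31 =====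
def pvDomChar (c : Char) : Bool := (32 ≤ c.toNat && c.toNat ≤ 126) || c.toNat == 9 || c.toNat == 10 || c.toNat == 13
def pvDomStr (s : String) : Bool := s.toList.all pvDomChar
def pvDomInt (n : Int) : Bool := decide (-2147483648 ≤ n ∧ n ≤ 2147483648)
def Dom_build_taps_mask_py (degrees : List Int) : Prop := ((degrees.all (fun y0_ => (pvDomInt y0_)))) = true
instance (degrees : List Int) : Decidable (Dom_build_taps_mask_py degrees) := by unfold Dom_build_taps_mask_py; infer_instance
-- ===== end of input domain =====

-- B sorts the distinct degrees ascending and excludes the highest positionally (slice [:-1]),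
-- summing the distinct powers of two, instead of A's OR loop filtering against max(degrees) (alternative).


-- ===== PORT A =====
-- mask = 0; highest = max(degrees); for degree in degrees: skip degree in (highest, 0), else mask |= 1 << (degree-1).
-- max(degrees) raises on []; 1 << (degree-1) raises for degree - 1 < 0: both excluded by Pre_,
-- so .getD 0 and .toNat are never taken on the raising side.
def build_taps_mask_py (degrees : List Int) : Int :=
  let highest : Int := (PySem.List.max? degrees (fun d => d)).getD 0
  degrees.foldl
    (fun (mask : Int) (degree : Int) =>
      if degree = highest ∨ degree = 0 then mask
      else PySem.Int.bor mask ((1 : Int) <<< (degree - 1).toNat))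
    0

-- ===== PORT B =====
-- ordered = sorted(set(degrees)); return sum(1 << (d - 1) for d in ordered[:-1] if d != 0).
-- (sorted over a set with the identity key: order-independent; 1 << (d-1) for d < 0 raises, excluded by Pre_.)
def build_taps_mask_py_alt (degrees : List Int) : Int :=
  let ordered : List Int := PySem.List.sorted (PySem.Set.ofList degrees) (fun d => d) false
  (((PySem.List.slice ordered none (some (-1))).filter (fun d => decide (d ≠ 0))).map
    (fun d => (1 : Int) <<< (d - 1).toNat)).sum

-- ===== PRECONDITION & SPEC =====
-- Pre_ is exactly A's domain: on the empty list Python's max raises ValueError, and any degree that is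
-- negative and not the maximum reaches 1 << (degree-1) with a negative shift (ValueError);
-- B raises on the negative-shift inputs too (and returns 0 on []).
def Pre_build_taps_mask_py (degrees : List Int) : Prop :=
  degrees ≠ [] ∧ ∀ d ∈ degrees, 0 ≤ d ∨ ∀ e ∈ degrees, e ≤ d
instance (degrees : List Int) : Decidable (Pre_build_taps_mask_py degrees) := by
  unfold Pre_build_taps_mask_py; infer_instance
def pvWitness_build_taps_mask_py : List Int := [3, 1, 0, 3, 2]

def Spec_build_taps_mask_py (degrees : List Int) (out : Int) : Prop := out = build_taps_mask_py_alt degrees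
instance (degrees : List Int) (out : Int) : Decidable (Spec_build_taps_mask_py degrees out) := by unfold Spec_build_taps_mask_py; infer_instance

-- ===== CLAIM (what is proved, stated in full; the proofs are below) =====
def Claim_equal_build_taps_mask_py : Prop := ∀ (degrees : List Int), Dom_build_taps_mask_py degrees → Pre_build_taps_mask_py degrees → Spec_build_taps_mask_py degrees (build_taps_mask_py degrees)
-- ===== LEMMAS AND PROOFS =====

-- Nat-level copies of A's loop and B's sum (proof helpers).
def pvNatFoldA (h : Int) (l : List Int) (m : Nat) : Nat :=
  l.foldl (fun m d => if d = h ∨ d = 0 then m else m ||| 2 ^ (d - 1).toNat) m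

def pvNatSum (bs : List Int) : Nat :=
  (bs.map (fun b => 2 ^ b.toNat)).sum

lemma pvNatFoldA_cons (h d : Int) (t : List Int) (m : Nat) :
    pvNatFoldA h (d :: t) m
      = pvNatFoldA h t (if d = h ∨ d = 0 then m else m ||| 2 ^ (d - 1).toNat) := rfl

lemma pvShiftCast (n : Nat) : (1 : Int) <<< n = ((2 ^ n : Nat) : Int) := by
  rw [Int.shiftLeft_eq]; push_cast; ring

lemma pvCastA (h : Int) : ∀ (l : List Int) (m : Nat),
    l.foldl (fun (mask : Int) (degree : Int) =>
      if degree = h ∨ degree = 0 then mask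
      else PySem.Int.bor mask ((1 : Int) <<< (degree - 1).toNat)) (m : Int)
    = ((pvNatFoldA h l m : Nat) : Int) := by
  intro l
  induction l with
  | nil => intro m; simp [pvNatFoldA]
  | cons d t ih =>
    intro m
    rw [List.foldl_cons, pvNatFoldA_cons]
    by_cases hc : d = h ∨ d = 0
    · rw [if_pos hc, if_pos hc, ih m]
    · rw [if_neg hc, if_neg hc, pvShiftCast, PySem.Int.bor_natCast, ih]

lemma pvCastSum : ∀ (bs : List Int),
    (bs.map (fun b => (1 : Int) <<< b.toNat)).sum = ((pvNatSum bs : Nat) : Int) := by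
  intro bs
  induction bs with
  | nil => simp [pvNatSum]
  | cons b t ih =>
    rw [List.map_cons, List.sum_cons, ih, Int.one_shiftLeft]
    have hstep : pvNatSum (b :: t) = 2 ^ b.toNat + pvNatSum t := by simp [pvNatSum]
    rw [hstep]
    push_cast
    ring

lemma pvTbA (h : Int) : ∀ (l : List Int) (m : Nat) (i : Nat),
    (pvNatFoldA h l m).testBit i
      = (m.testBit i || l.any (fun d => !decide (d = h ∨ d = 0) && ((d - 1).toNat == i))) := by
  intro l
  induction l with
  | nil => intro m i; simp [pvNatFoldA]
  | cons d t ih =>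
    intro m i
    rw [pvNatFoldA_cons, List.any_cons]
    by_cases hc : d = h ∨ d = 0
    · rw [if_pos hc, ih m i]
      simp [hc]
    · rw [if_neg hc, ih _ i, Nat.testBit_lor, Nat.testBit_two_pow]
      simp [hc, Bool.or_assoc, Bool.beq_eq_decide_eq]

-- a ||| 2^n = a + 2^n when bit n of a is clear
lemma pvLorTwoPow (n : Nat) : ∀ (a : Nat), a.testBit n = false → a ||| 2 ^ n = a + 2 ^ n := by
  induction n with
  | zero =>
    intro a h
    have hd := Nat.bit_testBit_zero_shiftRight_one a
    rw [h] at hd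
    have h1 : (2 : Nat) ^ 0 = Nat.bit true 0 := by simp [Nat.bit_val]
    rw [← hd, h1, Nat.lor_bit]
    simp [Nat.bit_val, Nat.shiftRight_one]
  | succ n ih =>
    intro a h
    have hd := Nat.bit_testBit_zero_shiftRight_one a
    have h2 : (2 : Nat) ^ (n + 1) = Nat.bit false (2 ^ n) := by
      simp [Nat.bit_val]; ring
    have ht : (a >>> 1).testBit n = false := by
      simpa [Nat.testBit_succ, Nat.shiftRight_one] using h
    rw [← hd, h2, Nat.lor_bit, ih _ ht]
    simp [Nat.bit_val]
    ring

-- bits of a sum of distinct nonnegative powers of two = membership of the exponent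
lemma pvSumTb : ∀ (bs : List Int), bs.Nodup → (∀ b ∈ bs, 0 ≤ b) → ∀ (i : Nat),
    (pvNatSum bs).testBit i = bs.any (fun b => b.toNat == i) := by
  intro bs
  induction bs with
  | nil => intro _ _ i; simp [pvNatSum]
  | cons b t ih =>
    intro hnd hnn i
    have hbt : b ∉ t := (List.nodup_cons.mp hnd).1
    have hrec := ih (List.nodup_cons.mp hnd).2 (fun x hx => hnn x (by simp [hx]))
    have hclear : (pvNatSum t).testBit b.toNat = false := by
      rw [hrec b.toNat, List.any_eq_false]
      intro x hx
      simp only [beq_iff_eq]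
      intro hxb
      have hxb' : x = b := by
        have := hnn x (by simp [hx]); have := hnn b (by simp); omega
      exact hbt (hxb' ▸ hx)
    have hsum : pvNatSum (b :: t) = pvNatSum t ||| 2 ^ b.toNat := by
      rw [pvLorTwoPow _ _ hclear]
      simp [pvNatSum]
      omega
    rw [hsum, Nat.testBit_lor, Nat.testBit_two_pow, hrec, List.any_cons]
    simp [Bool.or_comm, Bool.beq_eq_decide_eq]

-- when every degree is the maximum or 0, A's loop keeps its accumulator at 0
lemma pvSkipAllA (h : Int) : ∀ (l : List Int), (∀ d ∈ l, d = h ∨ d = 0) →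
    l.foldl (fun (mask : Int) (degree : Int) =>
      if degree = h ∨ degree = 0 then mask
      else PySem.Int.bor mask ((1 : Int) <<< (degree - 1).toNat)) 0 = 0 := by
  intro l hl
  induction l with
  | nil => simp
  | cons d t ih =>
    rw [List.foldl_cons, if_pos (hl d (by simp))]
    exact ih (fun x hx => hl x (by simp [hx]))

-- sorted(set(degrees)) with its last element removed: exactly the degrees different from the maximum
lemma pvDropLastMem (degrees : List Int) (h : Int)
    (hmax : PySem.List.max? degrees (fun d => d) = some h) :
    ∀ d, d ∈ (PySem.List.sorted (PySem.Set.ofList degrees) (fun x => x) false).dropLast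
      ↔ (d ∈ degrees ∧ d ≠ h) := by
  have hisMax := PySem.List.max?_isMax hmax
  have hhm := PySem.List.max?_mem hmax
  set s := PySem.List.sorted (PySem.Set.ofList degrees) (fun x => x) false with hs
  have hmem : ∀ x, x ∈ s ↔ x ∈ degrees := by
    intro x
    rw [hs, PySem.List.mem_sorted, PySem.Set.mem_ofList]
  have hpw : s.Pairwise (· < ·) := PySem.List.sorted_ofList_pairwise_lt degrees
  have hne : s ≠ [] := by
    intro h0
    have := (hmem h).mpr hhm
    simp [h0] at this
  have hconcat : s = s.dropLast ++ [s.getLast hne] := (List.dropLast_append_getLast hne).symm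
  set init : List Int := s.dropLast with hinit
  set last : Int := s.getLast hne with hlastdef
  have hlt : ∀ x ∈ init, x < last := by
    have hpw2 : (init ++ [last]).Pairwise (· < ·) := hconcat ▸ hpw
    rw [List.pairwise_append] at hpw2
    intro x hx
    exact hpw2.2.2 x hx last (by simp)
  have hlast_eq : last = h := by
    have h1 : last ≤ h := hisMax last ((hmem last).mp (by rw [hconcat]; simp))
    have h2 : h ∈ init ++ [last] := hconcat ▸ (hmem h).mpr hhm
    rw [List.mem_append] at h2
    rcases h2 with h2 | h2
    · exact absurd (hlt h h2) (by omega)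
    · simp at h2; omega
  intro d
  constructor
  · intro hd
    refine ⟨(hmem d).mp (by rw [hconcat]; exact List.mem_append_left _ hd), ?_⟩
    have := hlt d hd
    omega
  · rintro ⟨hd, hdh⟩
    have hmem2 : d ∈ init ++ [last] := hconcat ▸ (hmem d).mpr hd
    rw [List.mem_append] at hmem2
    rcases hmem2 with h2 | h2
    · exact h2
    · simp at h2; omega

lemma pvSortedNodup (degrees : List Int) :
    (PySem.List.sorted (PySem.Set.ofList degrees) (fun x => x) false).Nodup :=
  (PySem.List.sorted_ofList_pairwise_lt degrees).imp (fun hlt => by omega) |>.nodup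

-- ===== VERDICT (by name: the statement is the Claim_ definition above) =====
theorem build_taps_mask_py_spec : Claim_equal_build_taps_mask_py := by
  intro degrees _hdom hpre
  obtain ⟨hne, hpd⟩ := hpre
  unfold Spec_build_taps_mask_py build_taps_mask_py build_taps_mask_py_alt
  obtain ⟨h, hmax⟩ : ∃ h, PySem.List.max? degrees (fun d => d) = some h := by
    cases hm : PySem.List.max? degrees (fun d => d) with
    | none => exact absurd ((PySem.List.max?_eq_none_iff degrees (fun d => d)).mp hm) hne
    | some h => exact ⟨h, rfl⟩
  have hisMax := PySem.List.max?_isMax hmax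
  have hhm := PySem.List.max?_mem hmax
  simp only [hmax, Option.getD_some, PySem.List.slice_to_neg_one]
  set bs : List Int :=
    ((PySem.List.sorted (PySem.Set.ofList degrees) (fun x => x) false).dropLast.filter
      (fun d => decide (d ≠ 0))) with hbs
  have hmem_bs : ∀ d, d ∈ bs ↔ (d ∈ degrees ∧ d ≠ h ∧ d ≠ 0) := by
    intro d
    rw [hbs, List.mem_filter, pvDropLastMem degrees h hmax]
    simp [and_assoc]
  by_cases h1 : 1 ≤ h
  · -- main case: the maximum is positive, hence every degree is nonnegative
    have hnn : ∀ d ∈ degrees, 0 ≤ d := by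
      intro d hd
      rcases hpd d hd with h0 | hmaxd
      · exact h0
      · have := hmaxd h hhm; omega
    have hA := pvCastA h degrees 0
    simp only [Nat.cast_zero] at hA
    rw [hA]
    have hgoal : (bs.map (fun d : Int => (1 : Int) <<< (((d - 1).toNat : Nat) : Int)))
        = (bs.map (fun d : Int => d - 1)).map (fun b : Int => (1 : Int) <<< ((b.toNat : Nat) : Int)) := by
      rw [List.map_map]; rfl
    rw [hgoal, pvCastSum]
    have hnd_bs : (bs.map (fun d => d - 1)).Nodup := by
      refine List.Nodup.map (fun a b hab => by omega) ?_
      exact (pvSortedNodup degrees).sublist (List.dropLast_sublist _) |>.filter _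
    have hM : ∀ b ∈ bs.map (fun d => d - 1), 0 ≤ b := by
      intro b hb
      obtain ⟨d, hd, rfl⟩ := List.mem_map.mp hb
      obtain ⟨hdm, _, hd0⟩ := (hmem_bs d).mp hd
      have := hnn d hdm
      omega
    congr 1
    apply Nat.eq_of_testBit_eq
    intro i
    rw [pvTbA, pvSumTb _ hnd_bs hM i]
    simp only [Nat.zero_testBit, Bool.false_or]
    rw [Bool.eq_iff_iff]
    simp only [List.any_eq_true, Bool.and_eq_true, Bool.not_eq_true', decide_eq_false_iff_not,
      beq_iff_eq, List.mem_map]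
    constructor
    · rintro ⟨d, hd, hnc, hbit⟩
      rw [not_or] at hnc
      exact ⟨d - 1, ⟨d, (hmem_bs d).mpr ⟨hd, hnc.1, hnc.2⟩, rfl⟩, hbit⟩
    · rintro ⟨b, ⟨d, hd, rfl⟩, hbit⟩
      obtain ⟨hdm, hdh, hd0⟩ := (hmem_bs d).mp hd
      exact ⟨d, hdm, by tauto, hbit⟩
  · -- degenerate case: the maximum is ≤ 0, so every degree is the maximum or 0 and both sides are 0
    have hall : ∀ d ∈ degrees, d = h ∨ d = 0 := by
      intro d hd
      rcases hpd d hd with h0 | hmaxd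
      · right; have := hisMax d hd; omega
      · left; have := hmaxd h hhm; have := hisMax d hd; omega
    rw [pvSkipAllA h degrees hall]
    have hfil : bs = [] := by
      rw [List.eq_nil_iff_forall_not_mem]
      intro d hd
      obtain ⟨hdm, hdh, hd0⟩ := (hmem_bs d).mp hd
      rcases hall d hdm with rfl | rfl
      · exact hdh rfl
      · exact hd0 rfl
    rw [hfil]
    simp
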